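-- pv_equiv track=rewrite | github.com/gilrokdo1/fde-butfitvolt | 1Q 실적_fde/make_1q_final.py | compute_vals
-- ===== SOURCE A (Python) =====
-- MONTHS = ['2026-01', '2026-02', '2026-03']
--
-- def sum_cats(lookup, mid_filter, small_list, month):
--     total = 0
--     for (mid, small), months in lookup.items():
--         if mid_filter and mid_filter not in mid:
--             continue
--         if small in small_list:
--             total += months.get(month, 0)
--     return total
--
-- def compute_vals(lookup, leaf_map, sub_map):
--     row_vals = {}
--
--     for row, (mid_f, smalls) in leaf_map.items():
--         row_vals[row] = {
--             m: (sum_cats(lookup, mid_f, smalls, m) if smalls else 0)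
--             for m in MONTHS
--         }
--
--     seen = set()
--     def compute(r):
--         if r in seen:
--             return row_vals.get(r, {m: 0 for m in MONTHS})
--         if r in sub_map:
--             vals = {m: 0 for m in MONTHS}
--             for c in sub_map[r]:
--                 cv = compute(c)
--                 for m in MONTHS:
--                     vals[m] += cv.get(m, 0)
--             row_vals[r] = vals
--         seen.add(r)
--         return row_vals.get(r, {m: 0 for m in MONTHS})
--
--     for r in sub_map:
--         compute(r)
--     return row_vals
-- ===== SOURCE B (Python) =====
-- MONTHS = ['2026-01', '2026-02', '2026-03']
--
-- def compute_vals(lookup, leaf_map, sub_map):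
--     # Phase 1: single pass over lookup using a reverse index small -> [(row, mid_f)],
--     # accumulating all three months at once per matching entry.
--     acc = {row: (0, 0, 0) for row in leaf_map}
--     by_small = {}
--     for row, (mid_f, smalls) in leaf_map.items():
--         for s in set(smalls):
--             by_small.setdefault(s, []).append((row, mid_f))
--     for (mid, small), months in lookup.items():
--         bucket = by_small.get(small)
--         if not bucket:
--             continue
--         t = (months.get(MONTHS[0], 0), months.get(MONTHS[1], 0), months.get(MONTHS[2], 0))
--         for row, mid_f in bucket:
--             if mid_f and mid_f not in mid:
--                 continue
--             a = acc[row]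
--             acc[row] = (a[0] + t[0], a[1] + t[1], a[2] + t[2])
--     # Phase 2: memoized post-order aggregation over triples.
--     seen = set()
--     def compute(r):
--         if r in seen:
--             return acc.get(r, (0, 0, 0))
--         if r in sub_map:
--             v0 = v1 = v2 = 0
--             for c in sub_map[r]:
--                 cv = compute(c)
--                 v0 += cv[0]; v1 += cv[1]; v2 += cv[2]
--             acc[r] = (v0, v1, v2)
--         seen.add(r)
--         return acc.get(r, (0, 0, 0))
--     for r in sub_map:
--         compute(r)
--     return {row: dict(zip(MONTHS, t)) for row, t in acc.items()}
-- ===== Notes on version B (the rewrite author's own statement) =====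
-- stated objective: faster
-- what changed: B replaces A's per-row-per-month rescans of the whole lookup dict (sum_cats called rows*months times) by one reverse index small->(row,mid_filter) and a single pass over lookup that accumulates all three months at once into per-row triples, converted to month dicts only at the end; Pre_ excludes duplicate-key association lists (not representable as the Python dicts A takes) and cyclic sub_map, on which A's unmemoized-before-completion recursion raises RecursionError.
import Mathlib
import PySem

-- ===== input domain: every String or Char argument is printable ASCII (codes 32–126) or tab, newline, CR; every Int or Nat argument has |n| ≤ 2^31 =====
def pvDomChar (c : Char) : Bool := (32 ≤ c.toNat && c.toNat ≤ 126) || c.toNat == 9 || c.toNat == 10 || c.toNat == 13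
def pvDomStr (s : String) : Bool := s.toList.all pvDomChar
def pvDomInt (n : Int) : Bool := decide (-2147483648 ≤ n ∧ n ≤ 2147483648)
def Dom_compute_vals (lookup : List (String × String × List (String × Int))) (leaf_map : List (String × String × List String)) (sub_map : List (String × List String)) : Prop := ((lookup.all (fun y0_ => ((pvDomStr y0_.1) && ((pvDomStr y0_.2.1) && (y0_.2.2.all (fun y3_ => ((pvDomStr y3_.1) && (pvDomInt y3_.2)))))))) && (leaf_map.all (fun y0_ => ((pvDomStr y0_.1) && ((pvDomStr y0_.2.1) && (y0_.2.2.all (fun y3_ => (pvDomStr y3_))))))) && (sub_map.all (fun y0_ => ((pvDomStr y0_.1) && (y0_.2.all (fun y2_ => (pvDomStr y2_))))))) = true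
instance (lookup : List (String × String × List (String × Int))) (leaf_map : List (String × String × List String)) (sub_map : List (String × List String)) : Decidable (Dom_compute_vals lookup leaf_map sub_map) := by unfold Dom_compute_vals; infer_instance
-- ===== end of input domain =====

-- B replaces A's per-row-per-month rescans of the whole lookup by a reverse index small -> (row, mid_filter)
-- and a single pass over lookup accumulating all three months at once into per-row triples (objective: faster).

-- ===== PORT A =====
def pvMONTHS : List String := ["2026-01", "2026-02", "2026-03"]

def sum_cats (lookup : List (String × String × List (String × Int))) (mid_filter : String) (small_list : List String) (month : String) : Int :=
  lookup.foldl (fun total en =>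
    if mid_filter != "" && !(PySem.Str.isIn mid_filter en.1) then total
    else if small_list.contains en.2.1 then total + PySem.Dict.getD ⟨en.2.2⟩ month 0
    else total) 0

-- {m: 0 for m in MONTHS}
def pvZerosMD : PySem.Dict String Int := pvMONTHS.foldl (fun d m => d.insert m 0) ⟨[]⟩

-- the dict A stores for one leaf row: {m: (sum_cats(...) if smalls else 0) for m in MONTHS}
def pvLeafMD (lookup : List (String × String × List (String × Int))) (e : String × String × List String) : PySem.Dict String Int :=
  pvMONTHS.foldl (fun d m => d.insert m (if e.2.2 != [] then sum_cats lookup e.2.1 e.2.2 m else 0)) ⟨[]⟩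

-- A's memoised recursion `compute`; fuel only makes it total (Pre_ excludes the cyclic
-- sub_maps on which the Python recursion does not return)
def pvComputeA (sub_map : List (String × List String)) :
    Nat → (PySem.Dict String (PySem.Dict String Int) × PySem.Set String) → String →
    (PySem.Dict String (PySem.Dict String Int) × PySem.Set String) × PySem.Dict String Int
  | 0, st, _ => (st, pvZerosMD)
  | fuel+1, st, r =>
    if PySem.Set.contains st.2 r then (st, PySem.Dict.getD st.1 r pvZerosMD)
    else
      match PySem.Dict.get? ⟨sub_map⟩ r with
      | some children =>
        let p := children.foldl
          (fun (p : (PySem.Dict String (PySem.Dict String Int) × PySem.Set String) × PySem.Dict String Int) c =>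
            let q := pvComputeA sub_map fuel p.1 c
            (q.1, pvMONTHS.foldl (fun v m => v.modify m 0 (· + PySem.Dict.getD q.2 m 0)) p.2))
          (st, pvZerosMD)
        let rv2 := p.1.1.insert r p.2
        ((rv2, PySem.Set.add p.1.2 r), PySem.Dict.getD rv2 r pvZerosMD)
      | none => ((st.1, PySem.Set.add st.2 r), PySem.Dict.getD st.1 r pvZerosMD)

def compute_vals (lookup : List (String × String × List (String × Int))) (leaf_map : List (String × String × List String)) (sub_map : List (String × List String)) : List (String × List (String × Int)) :=
  let rv0 := leaf_map.foldl (fun rv e => rv.insert e.1 (pvLeafMD lookup e)) ⟨[]⟩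
  let stF := sub_map.foldl (fun st p => (pvComputeA sub_map (sub_map.length + 1) st p.1).1)
    (rv0, PySem.Set.empty)
  stF.1.items.map (fun p => (p.1, p.2.items))

-- ===== PORT B =====
def pvAddT (a b : Int × Int × Int) : Int × Int × Int := (a.1 + b.1, a.2.1 + b.2.1, a.2.2 + b.2.2)

def pvTripleOf (months : List (String × Int)) : Int × Int × Int :=
  (PySem.Dict.getD ⟨months⟩ "2026-01" 0, PySem.Dict.getD ⟨months⟩ "2026-02" 0, PySem.Dict.getD ⟨months⟩ "2026-03" 0)

-- reverse index: small -> [(row, mid_filter)], rows in leaf_map order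
def pvBySmall (leaf_map : List (String × String × List String)) : PySem.Dict String (List (String × String)) :=
  leaf_map.foldl (fun d e =>
    (PySem.Set.ofList e.2.2).foldl (fun d s => d.insert s (d.getD s [] ++ [(e.1, e.2.1)])) d) ⟨[]⟩

-- one lookup entry: add its month triple to every indexed row that passes the mid filter
def pvAddEntry (bySmall : PySem.Dict String (List (String × String)))
    (acc : PySem.Dict String (Int × Int × Int)) (en : String × String × List (String × Int)) :
    PySem.Dict String (Int × Int × Int) :=
  match PySem.Dict.get? bySmall en.2.1 with
  | none => acc
  | some bucket =>
    if bucket.isEmpty then acc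
    else
      let t := pvTripleOf en.2.2
      bucket.foldl (fun acc rm =>
        if rm.2 != "" && !(PySem.Str.isIn rm.2 en.1) then acc
        else acc.insert rm.1 (pvAddT (acc.getD rm.1 (0, 0, 0)) t)) acc  -- acc[rm.1]: rm.1 is always a key of acc

-- B's memoised recursion over month triples (same fuel discipline as A's port)
def pvComputeB (sub_map : List (String × List String)) :
    Nat → (PySem.Dict String (Int × Int × Int) × PySem.Set String) → String →
    (PySem.Dict String (Int × Int × Int) × PySem.Set String) × (Int × Int × Int)
  | 0, st, _ => (st, (0, 0, 0))
  | fuel+1, st, r =>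
    if PySem.Set.contains st.2 r then (st, PySem.Dict.getD st.1 r (0, 0, 0))
    else
      match PySem.Dict.get? ⟨sub_map⟩ r with
      | some children =>
        let p := children.foldl
          (fun (p : (PySem.Dict String (Int × Int × Int) × PySem.Set String) × (Int × Int × Int)) c =>
            let q := pvComputeB sub_map fuel p.1 c
            (q.1, pvAddT p.2 q.2))
          (st, (0, 0, 0))
        let rv2 := p.1.1.insert r p.2
        ((rv2, PySem.Set.add p.1.2 r), PySem.Dict.getD rv2 r (0, 0, 0))
      | none => ((st.1, PySem.Set.add st.2 r), PySem.Dict.getD st.1 r (0, 0, 0))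

def compute_vals_alt (lookup : List (String × String × List (String × Int))) (leaf_map : List (String × String × List String)) (sub_map : List (String × List String)) : List (String × List (String × Int)) :=
  let acc0 := leaf_map.foldl (fun d e => d.insert e.1 ((0, 0, 0) : Int × Int × Int)) ⟨[]⟩
  let acc1 := lookup.foldl (pvAddEntry (pvBySmall leaf_map)) acc0
  let stF := sub_map.foldl (fun st p => (pvComputeB sub_map (sub_map.length + 1) st p.1).1)
    (acc1, PySem.Set.empty)
  stF.1.items.map (fun p => (p.1, [("2026-01", p.2.1), ("2026-02", p.2.2.1), ("2026-03", p.2.2.2)]))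

-- ===== PRECONDITION & SPEC =====
-- transitive reachability in the sub_map graph (n expansion steps)
def pvReach (sub_map : List (String × List String)) : Nat → List String → List String
  | 0, S => S
  | n+1, S => pvReach sub_map n (PySem.Set.ofList (S ++ S.flatMap (fun r => PySem.Dict.getD ⟨sub_map⟩ r [])))

-- Pre_ excludes association lists with duplicate keys (not representable as the Python dicts
-- compute_vals takes) and cyclic sub_map graphs, on which A's recursion raises RecursionError.
def Pre_compute_vals (lookup : List (String × String × List (String × Int))) (leaf_map : List (String × String × List String)) (sub_map : List (String × List String)) : Prop :=
  (lookup.map (fun en => (en.1, en.2.1))).Nodup ∧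
  (∀ en ∈ lookup, (en.2.2.map (·.1)).Nodup) ∧
  (leaf_map.map (·.1)).Nodup ∧
  (sub_map.map (·.1)).Nodup ∧
  (∀ p ∈ sub_map, p.1 ∉ pvReach sub_map sub_map.length (PySem.Dict.getD ⟨sub_map⟩ p.1 []))

instance (lookup : List (String × String × List (String × Int))) (leaf_map : List (String × String × List String)) (sub_map : List (String × List String)) : Decidable (Pre_compute_vals lookup leaf_map sub_map) := by unfold Pre_compute_vals; infer_instance

def pvWitness_compute_vals : (List (String × String × List (String × Int))) × (List (String × String × List String)) × (List (String × List String)) :=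
  ([("mid1", "s", [("2026-01", 3), ("2026-02", 1)])],
   [("leaf", "", ["s"]), ("leaf2", "x", [])],
   [("root", ["leaf", "leaf2"])])

def Spec_compute_vals (lookup : List (String × String × List (String × Int))) (leaf_map : List (String × String × List String)) (sub_map : List (String × List String)) (out : List (String × List (String × Int))) : Prop := out = compute_vals_alt lookup leaf_map sub_map
instance (lookup : List (String × String × List (String × Int))) (leaf_map : List (String × String × List String)) (sub_map : List (String × List String)) (out : List (String × List (String × Int))) : Decidable (Spec_compute_vals lookup leaf_map sub_map out) := by unfold Spec_compute_vals; infer_instance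

-- ===== CLAIM (what is proved, stated in full; the proofs are below) =====
def Claim_equal_compute_vals : Prop := ∀ (lookup : List (String × String × List (String × Int))) (leaf_map : List (String × String × List String)) (sub_map : List (String × List String)), Dom_compute_vals lookup leaf_map sub_map → Pre_compute_vals lookup leaf_map sub_map → Spec_compute_vals lookup leaf_map sub_map (compute_vals lookup leaf_map sub_map)

-- ===== LEMMAS AND PROOFS =====

-- month dict of a triple, and lifting B's triple-valued dict to A's dict-of-month-dicts
def pvToMD (t : Int × Int × Int) : PySem.Dict String Int :=
  ⟨[("2026-01", t.1), ("2026-02", t.2.1), ("2026-03", t.2.2)]⟩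

def pvMapRV (rv : PySem.Dict String (Int × Int × Int)) : PySem.Dict String (PySem.Dict String Int) :=
  ⟨rv.items.map (fun p => (p.1, pvToMD p.2))⟩

def pvOk (mf mid : String) : Bool := !(mf != "" && !(PySem.Str.isIn mf mid))

def pvCondB (en : String × String × List (String × Int)) (e : String × String × List String) : Bool :=
  pvOk e.2.1 en.1 && e.2.2.contains en.2.1

def pvTripleF (lookup : List (String × String × List (String × Int))) (e : String × String × List String) (z : Int × Int × Int) : Int × Int × Int :=
  lookup.foldl (fun t en => if pvCondB en e then pvAddT t (pvTripleOf en.2.2) else t) z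

theorem pvZeros_eq : pvZerosMD = pvToMD (0, 0, 0) := by decide

theorem pvGet?_mapRV (rv : PySem.Dict String (Int × Int × Int)) (r : String) :
    (pvMapRV rv).get? r = (rv.get? r).map pvToMD := by
  have hpred : ((fun (p : String × PySem.Dict String Int) => p.1 == r) ∘
      (fun (p : String × (Int × Int × Int)) => (p.1, pvToMD p.2))) = fun p => p.1 == r := rfl
  simp only [pvMapRV, PySem.Dict.get?, List.find?_map, hpred]
  cases rv.1.find? (fun p => p.1 == r) <;> rfl

theorem pvContains_mapRV (rv : PySem.Dict String (Int × Int × Int)) (r : String) :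
    (pvMapRV rv).contains r = rv.contains r := by
  have hpred : ((fun (p : String × PySem.Dict String Int) => p.1 == r) ∘
      (fun (p : String × (Int × Int × Int)) => (p.1, pvToMD p.2))) = fun p => p.1 == r := rfl
  simp only [pvMapRV, PySem.Dict.contains, List.any_map, hpred]

theorem pvGetD_mapRV (rv : PySem.Dict String (Int × Int × Int)) (r : String) (z : Int × Int × Int) :
    (pvMapRV rv).getD r (pvToMD z) = pvToMD (rv.getD r z) := by
  simp only [PySem.Dict.getD, pvGet?_mapRV]
  cases rv.get? r <;> rfl

theorem pvMapRV_insert (rv : PySem.Dict String (Int × Int × Int)) (r : String) (v : Int × Int × Int) :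
    pvMapRV (rv.insert r v) = (pvMapRV rv).insert r (pvToMD v) := by
  unfold PySem.Dict.insert
  rw [pvContains_mapRV]
  by_cases h : rv.contains r = true
  · simp only [h, if_pos, pvMapRV, List.map_map]
    congr 1
    apply List.map_congr_left
    intro p _
    by_cases hp : (p.1 == r) = true <;> simp [hp, Function.comp]
  · simp only [h, Bool.false_eq_true, if_false, pvMapRV, List.map_append,
      List.map_cons, List.map_nil]

theorem pvMonthsAdd (v c : Int × Int × Int) :
    pvMONTHS.foldl (fun w m => w.modify m 0 (· + PySem.Dict.getD (pvToMD c) m 0)) (pvToMD v)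
      = pvToMD (pvAddT v c) := by
  simp [pvMONTHS, pvToMD, pvAddT, PySem.Dict.modify, PySem.Dict.insert, PySem.Dict.getD,
    PySem.Dict.get?, PySem.Dict.contains, List.foldl]

theorem pvCompute_lockstep (sub_map : List (String × List String)) (fuel : Nat) :
    ∀ (rv : PySem.Dict String (Int × Int × Int)) (seen : PySem.Set String) (r : String),
    pvComputeA sub_map fuel (pvMapRV rv, seen) r =
      ((pvMapRV (pvComputeB sub_map fuel (rv, seen) r).1.1,
        (pvComputeB sub_map fuel (rv, seen) r).1.2),
       pvToMD (pvComputeB sub_map fuel (rv, seen) r).2) := by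
  induction fuel with
  | zero => intro rv seen r; simp [pvComputeA, pvComputeB, pvZeros_eq]
  | succ fuel ih =>
    intro rv seen r
    simp only [pvComputeA, pvComputeB]
    by_cases hs : PySem.Set.contains seen r = true
    · simp only [hs, if_pos, pvZeros_eq, pvGetD_mapRV]
    · simp only [hs, Bool.false_eq_true, if_false]
      cases hc : PySem.Dict.get? (⟨sub_map⟩ : PySem.Dict String (List String)) r with
      | none => simp only [pvZeros_eq, pvGetD_mapRV]
      | some children =>
        clear hc
        have hfold : ∀ (rv : PySem.Dict String (Int × Int × Int)) (seen : PySem.Set String) (v : Int × Int × Int),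
            children.foldl
              (fun (p : (PySem.Dict String (PySem.Dict String Int) × PySem.Set String) × PySem.Dict String Int) c =>
                let q := pvComputeA sub_map fuel p.1 c
                (q.1, pvMONTHS.foldl (fun w m => w.modify m 0 (· + PySem.Dict.getD q.2 m 0)) p.2))
              ((pvMapRV rv, seen), pvToMD v) =
            (fun (p : (PySem.Dict String (Int × Int × Int) × PySem.Set String) × (Int × Int × Int)) =>
              ((pvMapRV p.1.1, p.1.2), pvToMD p.2))
            (children.foldl
              (fun (p : (PySem.Dict String (Int × Int × Int) × PySem.Set String) × (Int × Int × Int)) c =>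
                let q := pvComputeB sub_map fuel p.1 c
                (q.1, pvAddT p.2 q.2))
              ((rv, seen), v)) := by
          induction children with
          | nil => intro rv seen v; rfl
          | cons c cs ihc =>
            intro rv seen v
            simp only [List.foldl_cons]
            rw [ih rv seen c]
            cases hq : pvComputeB sub_map fuel (rv, seen) c with
            | mk st2 cv =>
              cases st2 with
              | mk rv2 seen2 =>
                simp only [pvMonthsAdd]
                exact ihc rv2 seen2 (pvAddT v cv)
        cases hfb : List.foldl
            (fun (p : (PySem.Dict String (Int × Int × Int) × PySem.Set String) × (Int × Int × Int)) c =>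
              let q := pvComputeB sub_map fuel p.1 c
              (q.1, pvAddT p.2 q.2)) ((rv, seen), ((0 : Int), (0 : Int), (0 : Int))) children with
        | mk stF vF =>
          cases stF with
          | mk rvF seenF =>
            have h2 := hfold rv seen (0, 0, 0)
            rw [hfb] at h2
            simp only [pvZeros_eq, h2, hfb]
            rw [← pvMapRV_insert, pvGetD_mapRV]

theorem pvInit_items_gen {T : Type} (L : List (String × String × List String)) (f : String × String × List String → T) :
    ∀ (d0 : PySem.Dict String T), (L.map (·.1)).Nodup → (∀ e ∈ L, d0.contains e.1 = false) →
    (L.foldl (fun d e => d.insert e.1 (f e)) d0).items = d0.items ++ L.map (fun e => (e.1, f e)) := by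
  induction L with
  | nil => intro d0 _ _; simp
  | cons e rest ih =>
    intro d0 hn hd
    simp only [List.foldl_cons]
    have hce : d0.contains e.1 = false := hd e (List.mem_cons_self)
    have h1 : (d0.insert e.1 (f e)).items = d0.items ++ [(e.1, f e)] :=
      PySem.Dict.items_insert_of_not_contains d0 (f e) hce
    have hn' : (rest.map (·.1)).Nodup := (List.nodup_cons.mp hn).2
    have hke : e.1 ∉ rest.map (·.1) := (List.nodup_cons.mp hn).1
    rw [ih (d0.insert e.1 (f e)) hn' ?_, h1]
    · simp
    · intro e' he'
      rw [PySem.Dict.contains_insert]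
      have hne : e'.1 ≠ e.1 := by
        intro h; exact hke (h ▸ List.mem_map_of_mem he')
      simp [hne, hd e' (List.mem_cons_of_mem _ he')]

theorem pvInit_items {T : Type} (L : List (String × String × List String)) (f : String × String × List String → T) :
    (L.map (·.1)).Nodup →
    (L.foldl (fun d e => d.insert e.1 (f e)) (⟨[]⟩ : PySem.Dict String T)).items = L.map (fun e => (e.1, f e)) := by
  intro hn
  rw [pvInit_items_gen L f ⟨[]⟩ hn (by intro e _; rfl)]
  rfl

theorem pvGetD_of_items {T : Type} (acc : PySem.Dict String T) (L : List (String × String × List String))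
    (g : String × String × List String → T) (e₀ : String × String × List String) (z : T) :
    acc.items = L.map (fun e => (e.1, g e)) → (L.map (·.1)).Nodup → e₀ ∈ L →
    acc.getD e₀.1 z = g e₀ := by
  intro hi hn he
  have hmem : (e₀.1, g e₀) ∈ acc.items := by
    rw [hi]; exact List.mem_map_of_mem he
  have hkeys : acc.keys.Nodup := by
    have : acc.keys = L.map (·.1) := by
      cases acc with
      | mk items => simp only [PySem.Dict.keys_mk] at *
                    rw [hi, List.map_map]; rfl
    rw [this]; exact hn
  rw [PySem.Dict.getD, PySem.Dict.get?_of_mem_items acc hmem hkeys]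
  rfl

theorem pvUpd_items {T : Type} (acc : PySem.Dict String T) (L : List (String × String × List String))
    (g : String × String × List String → T) (e₀ : String × String × List String) (v : T) :
    acc.items = L.map (fun e => (e.1, g e)) → e₀ ∈ L →
    (acc.insert e₀.1 v).items = L.map (fun e => (e.1, if e.1 = e₀.1 then v else g e)) := by
  intro hi he
  have hc : acc.contains e₀.1 = true := by
    cases acc with
    | mk items =>
      simp only [PySem.Dict.contains_mk]
      subst hi
      refine List.any_eq_true.mpr ⟨(e₀.1, g e₀), List.mem_map_of_mem he, by simp⟩
  rw [PySem.Dict.items_insert_of_contains acc v hc, hi, List.map_map]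
  apply List.map_congr_left
  intro e _
  by_cases h : e.1 = e₀.1 <;> simp [h, Function.comp]

theorem pvSS (x : String × String) (ss : List String) :
    ss.Nodup → ∀ (d : PySem.Dict String (List (String × String))) (s : String),
    (ss.foldl (fun d s => d.insert s (d.getD s [] ++ [x])) d).get? s =
      if s ∈ ss then some (d.getD s [] ++ [x]) else d.get? s := by
  induction ss with
  | nil => intro _ d s; simp
  | cons s₀ rest ih =>
    intro hnd d s
    obtain ⟨h₀, hrest⟩ := List.nodup_cons.mp hnd
    simp only [List.foldl_cons]
    rw [ih hrest]
    by_cases hmem : s ∈ rest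
    · have hne : s ≠ s₀ := fun h => h₀ (h ▸ hmem)
      have : (d.insert s₀ (d.getD s₀ [] ++ [x])).getD s [] = d.getD s [] := by
        rw [PySem.Dict.getD, PySem.Dict.get?_insert_of_ne _ _ hne, PySem.Dict.getD]
      simp [hmem, this, List.mem_cons]
    · by_cases hs : s = s₀
      · subst hs
        simp [hmem, PySem.Dict.get?_insert_self]
      · rw [PySem.Dict.get?_insert_of_ne _ _ hs]
        simp [hmem, hs]

theorem pvBC' :
    ∀ (rest : List (String × String × List String)) (d : PySem.Dict String (List (String × String))) (s : String),
    (rest.foldl (fun d e =>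
      (PySem.Set.ofList e.2.2).foldl (fun d s => d.insert s (d.getD s [] ++ [(e.1, e.2.1)])) d) d).get? s =
    (if (rest.filter (fun e => e.2.2.contains s)) = [] then d.get? s
     else some (d.getD s [] ++ (rest.filter (fun e => e.2.2.contains s)).map (fun e => (e.1, e.2.1)))) := by
  intro rest
  induction rest with
  | nil => intro d s; simp
  | cons e tail ih =>
    intro d s
    simp only [List.foldl_cons]
    rw [ih]
    have hss := pvSS (e.1, e.2.1) (PySem.Set.ofList e.2.2) (PySem.Set.nodup_ofList _)
    by_cases hp : s ∈ e.2.2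
    · have hmem : s ∈ PySem.Set.ofList e.2.2 := (PySem.Set.mem_ofList _ _).mpr hp
      have hget : (PySem.Set.ofList e.2.2 |>.foldl (fun d s => d.insert s (d.getD s [] ++ [(e.1, e.2.1)])) d).get? s
          = some (d.getD s [] ++ [(e.1, e.2.1)]) := by rw [hss d s]; simp [hmem]
      have hgetD : (PySem.Set.ofList e.2.2 |>.foldl (fun d s => d.insert s (d.getD s [] ++ [(e.1, e.2.1)])) d).getD s []
          = d.getD s [] ++ [(e.1, e.2.1)] := by rw [PySem.Dict.getD, hget]; rfl
      have hpc : e.2.2.contains s = true := by simpa using hp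
      simp only [List.filter_cons, hpc, if_pos]
      by_cases htail : tail.filter (fun e => e.2.2.contains s) = []
      · simp [hget, hgetD]
      · simp [hget, hgetD]
    · have hmem : s ∉ PySem.Set.ofList e.2.2 := fun h => hp ((PySem.Set.mem_ofList _ _).mp h)
      have hget : (PySem.Set.ofList e.2.2 |>.foldl (fun d s => d.insert s (d.getD s [] ++ [(e.1, e.2.1)])) d).get? s
          = d.get? s := by rw [hss d s]; simp [hmem]
      have hgetD : (PySem.Set.ofList e.2.2 |>.foldl (fun d s => d.insert s (d.getD s [] ++ [(e.1, e.2.1)])) d).getD s []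
          = d.getD s [] := by rw [PySem.Dict.getD, hget]; rfl
      have hpc : e.2.2.contains s = false := by simpa using hp
      simp only [List.filter_cons, hpc]
      simp [hget, hgetD]

theorem pvBySmall_get? (leaf_map : List (String × String × List String)) (s : String) :
    (pvBySmall leaf_map).get? s =
      (if (leaf_map.filter (fun e => e.2.2.contains s)) = [] then none
       else some ((leaf_map.filter (fun e => e.2.2.contains s)).map (fun e => (e.1, e.2.1)))) := by
  unfold pvBySmall
  rw [pvBC' leaf_map ⟨[]⟩ s]
  by_cases h : leaf_map.filter (fun e => e.2.2.contains s) = [] <;> simp <;> rfl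

theorem pvKeyUniq (L : List (String × String × List String)) (hn : (L.map (·.1)).Nodup)
    {e e' : String × String × List String} (he : e ∈ L) (he' : e' ∈ L) (h : e.1 = e'.1) : e = e' :=
  List.inj_on_of_nodup_map hn he he' h

theorem pvBF (L : List (String × String × List String)) (hn : (L.map (·.1)).Nodup)
    (mid : String) (t : Int × Int × Int) :
    ∀ (b : List (String × String)) (g : String × String × List String → Int × Int × Int)
      (acc : PySem.Dict String (Int × Int × Int)),
    acc.items = L.map (fun e => (e.1, g e)) →
    (b.map (·.1)).Nodup →
    (∀ rm ∈ b, ∃ e, e ∈ L ∧ e.1 = rm.1 ∧ e.2.1 = rm.2) →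
    (b.foldl (fun acc rm =>
        if rm.2 != "" && !(PySem.Str.isIn rm.2 mid) then acc
        else acc.insert rm.1 (pvAddT (acc.getD rm.1 (0, 0, 0)) t)) acc).items
      = L.map (fun e => (e.1, if (e.1, e.2.1) ∈ b ∧ pvOk e.2.1 mid = true then pvAddT (g e) t else g e)) := by
  intro b
  induction b with
  | nil =>
    intro g acc hi _ _
    simp only [List.foldl_nil]
    rw [hi]; apply List.map_congr_left; intro e _; simp
  | cons rm rest ihb =>
    intro g acc hi hbn hb
    obtain ⟨hk0, hkrest⟩ := List.nodup_cons.mp hbn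
    simp only [List.foldl_cons]
    obtain ⟨e₀, he₀, hk, hm⟩ := hb rm List.mem_cons_self
    have hb' : ∀ rm' ∈ rest, ∃ e, e ∈ L ∧ e.1 = rm'.1 ∧ e.2.1 = rm'.2 :=
      fun rm' h => hb rm' (List.mem_cons_of_mem _ h)
    by_cases hok : pvOk rm.2 mid = true
    · have hskip : (rm.2 != "" && !(PySem.Str.isIn rm.2 mid)) = false := by
        rw [pvOk, Bool.not_eq_eq_eq_not, Bool.not_true] at hok; exact hok
      rw [hskip]
      simp only [Bool.false_eq_true, if_false]
      have hgd : acc.getD rm.1 (0, 0, 0) = g e₀ := by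
        rw [← hk]; exact pvGetD_of_items acc L g e₀ _ hi hn he₀
      have hins' : (acc.insert rm.1 (pvAddT (acc.getD rm.1 (0, 0, 0)) t)).items
          = L.map (fun e => (e.1, if e.1 = rm.1 then pvAddT (g e) t else g e)) := by
        rw [hgd, ← hk, pvUpd_items acc L g e₀ (pvAddT (g e₀) t) hi he₀]
        apply List.map_congr_left; intro e he
        by_cases hh : e.1 = e₀.1
        · have heq : e = e₀ := pvKeyUniq L hn he he₀ hh
          simp [heq]
        · simp [hh]
      rw [ihb (fun e => if e.1 = rm.1 then pvAddT (g e) t else g e) _ hins' hkrest hb']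
      apply List.map_congr_left; intro e he
      by_cases hh : e.1 = rm.1
      · have heq : e = e₀ := pvKeyUniq L hn he he₀ (by rw [hh, hk])
        have hnotin : (e.1, e.2.1) ∉ rest := by
          intro hmm
          apply hk0
          have h1 : e.1 ∈ rest.map (·.1) := List.mem_map_of_mem hmm
          rwa [hh] at h1
        have hin : (e.1, e.2.1) ∈ rm :: rest := by
          have : (e.1, e.2.1) = rm := by
            rw [heq, hk, hm]
          rw [this]; exact List.mem_cons_self
        have hoke : pvOk e.2.1 mid = true := by rw [heq, hm]; exact hok
        have c1 : ¬((e.1, e.2.1) ∈ rest ∧ pvOk e.2.1 mid = true) := fun h => hnotin h.1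
        rw [if_neg c1, if_pos hh, if_pos ⟨hin, hoke⟩]
      · have hne : (e.1, e.2.1) ≠ rm := by
          intro hmm; exact hh (congrArg Prod.fst hmm)
        simp only [if_neg hh, List.mem_cons, hne, false_or]
    · have hskip : (rm.2 != "" && !(PySem.Str.isIn rm.2 mid)) = true := by
        have h1 : pvOk rm.2 mid = false := eq_false_of_ne_true hok
        rw [pvOk, Bool.not_eq_eq_eq_not, Bool.not_false] at h1; exact h1
      rw [hskip]
      simp only [if_true]
      rw [ihb g acc hi hkrest hb']
      apply List.map_congr_left; intro e he
      by_cases hin : (e.1, e.2.1) ∈ rest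
      · simp [hin, List.mem_cons]
      · by_cases heq : (e.1, e.2.1) = rm
        · have h2 : pvOk e.2.1 mid = false := by
            have h3 : e.2.1 = rm.2 := congrArg Prod.snd heq
            rw [h3]; exact eq_false_of_ne_true hok
          simp [heq, h2]
        · simp [hin, heq, List.mem_cons]

theorem pvSC (lookup : List (String × String × List (String × Int))) (e : String × String × List String) :
    ∀ z : Int × Int × Int,
    pvTripleF lookup e z =
      (lookup.foldl (fun total en =>
          if e.2.1 != "" && !(PySem.Str.isIn e.2.1 en.1) then total
          else if e.2.2.contains en.2.1 then total + PySem.Dict.getD ⟨en.2.2⟩ "2026-01" 0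
          else total) z.1,
       lookup.foldl (fun total en =>
          if e.2.1 != "" && !(PySem.Str.isIn e.2.1 en.1) then total
          else if e.2.2.contains en.2.1 then total + PySem.Dict.getD ⟨en.2.2⟩ "2026-02" 0
          else total) z.2.1,
       lookup.foldl (fun total en =>
          if e.2.1 != "" && !(PySem.Str.isIn e.2.1 en.1) then total
          else if e.2.2.contains en.2.1 then total + PySem.Dict.getD ⟨en.2.2⟩ "2026-03" 0
          else total) z.2.2) := by
  induction lookup with
  | nil => intro z; rfl
  | cons en rest ih =>
    intro z
    simp only [pvTripleF, List.foldl_cons] at *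
    by_cases b1 : (e.2.1 != "" && !(PySem.Str.isIn e.2.1 en.1)) = true
    · have hc : pvCondB en e = false := by
        simp only [pvCondB, pvOk, b1, Bool.not_true, Bool.false_and]
      rw [hc, b1]
      simp only [Bool.false_eq_true, if_false, if_true]
      exact ih z
    · have b1' : (e.2.1 != "" && !(PySem.Str.isIn e.2.1 en.1)) = false := by
        rwa [Bool.not_eq_true] at b1
      by_cases b2 : e.2.2.contains en.2.1 = true
      · have hc : pvCondB en e = true := by
          simp only [pvCondB, pvOk, b1', Bool.not_false, Bool.true_and, b2]
        rw [hc, b1']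
        simp only [Bool.false_eq_true, if_false, if_true, b2]
        exact ih (pvAddT z (pvTripleOf en.2.2))
      · have b2' : e.2.2.contains en.2.1 = false := by rwa [Bool.not_eq_true] at b2
        have hc : pvCondB en e = false := by
          simp only [pvCondB, pvOk, b1', Bool.not_false, Bool.true_and, b2']
        rw [hc, b1']
        simp only [Bool.false_eq_true, if_false, b2']
        exact ih z

theorem pvTripleF_nil (lookup : List (String × String × List (String × Int)))
    (e : String × String × List String) (h : e.2.2 = []) : ∀ z, pvTripleF lookup e z = z := by
  induction lookup with
  | nil => intro z; rfl
  | cons en rest ih =>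
    intro z
    simp only [pvTripleF, List.foldl_cons] at *
    have : pvCondB en e = false := by simp [pvCondB, h]
    rw [this]
    simp only [Bool.false_eq_true, if_false]
    exact ih z

theorem pvLeafMD_eq (lookup : List (String × String × List (String × Int))) (e : String × String × List String) :
    pvLeafMD lookup e = pvToMD (pvTripleF lookup e (0, 0, 0)) := by
  by_cases h : e.2.2 = []
  · rw [pvTripleF_nil lookup e h]
    simp [pvLeafMD, pvMONTHS, PySem.Dict.insert, PySem.Dict.contains, List.foldl, h, pvToMD]
  · have h' : (e.2.2 != []) = true := by simpa using h
    rw [pvSC lookup e (0, 0, 0)]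
    simp [pvLeafMD, pvMONTHS, PySem.Dict.insert, PySem.Dict.contains, List.foldl, h', pvToMD, sum_cats]

theorem pvAddEntry_items (leaf_map : List (String × String × List String))
    (hn : (leaf_map.map (·.1)).Nodup)
    (en : String × String × List (String × Int))
    (acc : PySem.Dict String (Int × Int × Int)) (g : String × String × List String → Int × Int × Int)
    (hi : acc.items = leaf_map.map (fun e => (e.1, g e))) :
    (pvAddEntry (pvBySmall leaf_map) acc en).items =
      leaf_map.map (fun e => (e.1, if pvCondB en e then pvAddT (g e) (pvTripleOf en.2.2) else g e)) := by
  unfold pvAddEntry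
  rw [pvBySmall_get? leaf_map en.2.1]
  by_cases hF : leaf_map.filter (fun e => e.2.2.contains en.2.1) = []
  · simp only [hF, if_pos]
    rw [hi]
    apply List.map_congr_left; intro e he
    have hp : e.2.2.contains en.2.1 = false := by
      have := List.filter_eq_nil_iff.mp hF e he
      rwa [Bool.not_eq_true] at this
    have hc : pvCondB en e = false := by simp only [pvCondB, hp, Bool.and_false]
    rw [hc]
    simp
  · simp only [hF, if_false]
    have hne : ((leaf_map.filter (fun e => e.2.2.contains en.2.1)).map (fun e => (e.1, e.2.1))).isEmpty = false := by
      rw [List.isEmpty_eq_false_iff, List.ne_nil_iff_exists_cons]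
      obtain ⟨x, xs, hx⟩ := List.ne_nil_iff_exists_cons.mp hF
      exact ⟨(x.1, x.2.1), xs.map _, by rw [hx]; rfl⟩
    rw [hne]
    simp only [Bool.false_eq_true, if_false]
    have hsub : ((leaf_map.filter (fun e => e.2.2.contains en.2.1)).map (fun e => (e.1, e.2.1))).map (·.1)
        = (leaf_map.filter (fun e => e.2.2.contains en.2.1)).map (·.1) := by
      rw [List.map_map]; rfl
    have hbn : (((leaf_map.filter (fun e => e.2.2.contains en.2.1)).map (fun e => (e.1, e.2.1))).map (·.1)).Nodup := by
      rw [hsub]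
      exact hn.sublist (List.Sublist.map _ List.filter_sublist)
    rw [pvBF leaf_map hn en.1 (pvTripleOf en.2.2) _ g acc hi hbn ?_]
    · apply List.map_congr_left; intro e he
      have hiff : ((e.1, e.2.1) ∈ (leaf_map.filter (fun e => e.2.2.contains en.2.1)).map (fun e => (e.1, e.2.1))
            ∧ pvOk e.2.1 en.1 = true) ↔ pvCondB en e = true := by
        constructor
        · rintro ⟨hmem, hok⟩
          obtain ⟨e', he', hfe⟩ := List.mem_map.mp hmem
          obtain ⟨he'L, hpe'⟩ := List.mem_filter.mp he'
          have : e' = e := pvKeyUniq leaf_map hn he'L he (Prod.ext_iff.mp hfe).1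
          subst this
          simp only [pvCondB, hok, hpe', Bool.and_self]
        · intro hc
          simp only [pvCondB, Bool.and_eq_true] at hc
          refine ⟨List.mem_map.mpr ⟨e, List.mem_filter.mpr ⟨he, by rw [hc.2]⟩, rfl⟩, hc.1⟩
      by_cases hc : pvCondB en e = true
      · rw [if_pos (hiff.mpr hc), if_pos hc]
      · rw [if_neg (fun h => hc (hiff.mp h)), if_neg (by simpa using hc)]
    · intro rm hrm
      obtain ⟨e', he', hfe⟩ := List.mem_map.mp hrm
      exact ⟨e', (List.mem_filter.mp he').1, (Prod.ext_iff.mp hfe).1, (Prod.ext_iff.mp hfe).2⟩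

theorem pvFoldEntries (leaf_map : List (String × String × List String)) (hn : (leaf_map.map (·.1)).Nodup) :
    ∀ (lookup : List (String × String × List (String × Int)))
      (g : String × String × List String → Int × Int × Int) (acc : PySem.Dict String (Int × Int × Int)),
    acc.items = leaf_map.map (fun e => (e.1, g e)) →
    (lookup.foldl (pvAddEntry (pvBySmall leaf_map)) acc).items
      = leaf_map.map (fun e => (e.1, pvTripleF lookup e (g e))) := by
  intro lookup
  induction lookup with
  | nil => intro g acc hi; rw [List.foldl_nil, hi]; rfl
  | cons en rest ih =>
    intro g acc hi
    rw [List.foldl_cons]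
    have h1 := pvAddEntry_items leaf_map hn en acc g hi
    rw [ih (fun e => if pvCondB en e then pvAddT (g e) (pvTripleOf en.2.2) else g e) _ h1]
    rfl

theorem pvTopFold (sub_map : List (String × List String)) (fuel : Nat) :
    ∀ (subl : List (String × List String)) (rv : PySem.Dict String (Int × Int × Int)) (seen : PySem.Set String),
    subl.foldl (fun st p => (pvComputeA sub_map fuel st p.1).1) (pvMapRV rv, seen)
      = (pvMapRV (subl.foldl (fun st p => (pvComputeB sub_map fuel st p.1).1) (rv, seen)).1,
         (subl.foldl (fun st p => (pvComputeB sub_map fuel st p.1).1) (rv, seen)).2) := by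
  intro subl
  induction subl with
  | nil => intro rv seen; rfl
  | cons p ps ih =>
    intro rv seen
    simp only [List.foldl_cons]
    rw [pvCompute_lockstep sub_map fuel rv seen p.1]
    cases hq : pvComputeB sub_map fuel (rv, seen) p.1 with
    | mk st2 cv =>
      cases st2 with
      | mk rv2 seen2 => exact ih rv2 seen2

-- ===== VERDICT (by name: the statement is the Claim_ definition above) =====
theorem compute_vals_spec : Claim_equal_compute_vals := by
  unfold Claim_equal_compute_vals Spec_compute_vals
  intro lookup leaf_map sub_map _ hpre
  obtain ⟨_, _, hleaf, _, _⟩ := hpre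
  simp only [compute_vals, compute_vals_alt]
  have hacc0 : (leaf_map.foldl (fun d e => d.insert e.1 ((0, 0, 0) : Int × Int × Int)) (⟨[]⟩ : PySem.Dict String (Int × Int × Int))).items
      = leaf_map.map (fun e => (e.1, ((0, 0, 0) : Int × Int × Int))) :=
    pvInit_items leaf_map (fun _ => (0, 0, 0)) hleaf
  have hacc1 : (lookup.foldl (pvAddEntry (pvBySmall leaf_map))
        (leaf_map.foldl (fun d e => d.insert e.1 ((0, 0, 0) : Int × Int × Int)) (⟨[]⟩ : PySem.Dict String (Int × Int × Int)))).items
      = leaf_map.map (fun e => (e.1, pvTripleF lookup e (0, 0, 0))) :=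
    pvFoldEntries leaf_map hleaf lookup (fun _ => (0, 0, 0)) _ hacc0
  have hrv0 : (leaf_map.foldl (fun rv e => rv.insert e.1 (pvLeafMD lookup e)) (⟨[]⟩ : PySem.Dict String (PySem.Dict String Int)))
      = pvMapRV (lookup.foldl (pvAddEntry (pvBySmall leaf_map))
          (leaf_map.foldl (fun d e => d.insert e.1 ((0, 0, 0) : Int × Int × Int)) (⟨[]⟩ : PySem.Dict String (Int × Int × Int)))) := by
    have h1 : (leaf_map.foldl (fun rv e => rv.insert e.1 (pvLeafMD lookup e)) (⟨[]⟩ : PySem.Dict String (PySem.Dict String Int))).items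
        = leaf_map.map (fun e => (e.1, pvLeafMD lookup e)) :=
      pvInit_items leaf_map (pvLeafMD lookup) hleaf
    have h2 : (pvMapRV (lookup.foldl (pvAddEntry (pvBySmall leaf_map))
          (leaf_map.foldl (fun d e => d.insert e.1 ((0, 0, 0) : Int × Int × Int)) (⟨[]⟩ : PySem.Dict String (Int × Int × Int))))).items
        = leaf_map.map (fun e => (e.1, pvLeafMD lookup e)) := by
      simp only [pvMapRV, hacc1, List.map_map]
      apply List.map_congr_left
      intro e _
      simp only [Function.comp]
      rw [pvLeafMD_eq]
    have h3 := h1.trans h2.symm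
    cases hA : (leaf_map.foldl (fun rv e => rv.insert e.1 (pvLeafMD lookup e))
        (⟨[]⟩ : PySem.Dict String (PySem.Dict String Int))) with
    | mk itemsA =>
      cases hB : pvMapRV (lookup.foldl (pvAddEntry (pvBySmall leaf_map))
          (leaf_map.foldl (fun d e => d.insert e.1 ((0, 0, 0) : Int × Int × Int)) (⟨[]⟩ : PySem.Dict String (Int × Int × Int)))) with
      | mk itemsB =>
        rw [hA, hB] at h3
        exact congrArg PySem.Dict.mk h3
  rw [hrv0, pvTopFold sub_map (sub_map.length + 1) sub_map _ PySem.Set.empty]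
  simp only [pvMapRV, List.map_map]
  rfl
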